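-- pv_equiv track=rewrite | github.com/allenkim0129/InterviewPrep | CanConstruct.py | dfs
-- ===== SOURCE A (Python) =====
-- def dfs(graph, num):
--     """
--     Description:
--     -----------
--         This method runs Depth First Search of 'graph' from a 'num'
--
--         Time complexity: big O(N)
--             - M: len(sequence)
--             - N: len(sub_sequences)
--             - L: max(sub_sequences[i])
--
--     Parameters:
--     -----------
--         graph : The graph
--                 - key: The beginning of sub-sequence
--                 - val: The expected next begining balue of another sub-sequence
--         num : The beginning of sub-sequcence
--     Returns:
--     --------
--         Return True if the graph reachs to the end(None), otherwise return False
--     """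
--     # Base cases
--     if num is None:
--         return True
--
--     if num not in graph:
--         return False
--
--     # Recurse over to the next sub-sequence
--     for next_num in graph[num]:
--         if dfs(graph, next_num):
--             return True
--     return False
-- ===== SOURCE B (Python) =====
-- def dfs(graph, num):
--     # Bounded-closure reachability: grow the set of nodes reachable from num
--     # (len(graph)+1 rounds always suffice: a shortest path visits distinct keys),
--     # stopping as soon as the set stops growing; then test whether None was reached.
--     reach = {num}
--     for _ in range(len(graph) + 1):
--         size = len(reach)
--         for n in list(reach):
--             if n is not None and n in graph:
--                 for m in graph[n]:
--                     reach.add(m)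
--         if len(reach) == size:
--             break
--     return None in reach
-- ===== Notes on version B (the rewrite author's own statement) =====
-- stated objective: alternative
-- what changed: A's memoization-free recursive DFS (exponential worst case on shared sub-paths) is replaced by a bounded set-closure reachability computation: grow the set of nodes reachable from num round by round until it stops growing (at most len(graph)+1 rounds), then test membership of None.
-- outside the precondition, e.g. on dfs({1: [None, 1]}, 1): A returns True, B returns True
import Mathlib
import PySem

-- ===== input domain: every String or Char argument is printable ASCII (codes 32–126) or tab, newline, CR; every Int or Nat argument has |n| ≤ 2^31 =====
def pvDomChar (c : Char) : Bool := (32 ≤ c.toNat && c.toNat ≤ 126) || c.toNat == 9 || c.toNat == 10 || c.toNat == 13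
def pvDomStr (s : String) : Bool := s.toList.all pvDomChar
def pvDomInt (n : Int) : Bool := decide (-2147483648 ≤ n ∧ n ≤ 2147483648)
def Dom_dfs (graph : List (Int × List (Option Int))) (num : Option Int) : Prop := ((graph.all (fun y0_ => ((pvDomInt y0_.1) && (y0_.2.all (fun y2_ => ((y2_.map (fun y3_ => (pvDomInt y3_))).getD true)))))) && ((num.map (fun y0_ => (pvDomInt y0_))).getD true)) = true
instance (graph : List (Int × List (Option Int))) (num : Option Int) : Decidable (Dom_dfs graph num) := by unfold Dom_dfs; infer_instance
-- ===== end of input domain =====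

-- B replaces A's memoization-free recursive DFS by a bounded set-closure reachability
-- computation (grow the reachable set until it stops growing, then test for None).

-- ===== PORT A =====
-- dict lookup (first match), `graph[num]` / `num in graph`
def edgesK (g : List (Int × List (Option Int))) (k : Int) : Option (List (Option Int)) :=
  (g.find? (fun p => p.1 == k)).map Prod.snd

-- A's recursion, with fuel g.length + 1: on inputs satisfying Pre_dfs (no cycle
-- reachable from num) every recursion path visits distinct keys, so this fuel is
-- never exhausted and the recursion is exactly A's.
def dfsFuelA (g : List (Int × List (Option Int))) : Nat → Option Int → Bool
  | _, none => true
  | 0, some _ => false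
  | f+1, some n =>
    match edgesK g n with
    | none => false
    | some lst => lst.any (fun m => dfsFuelA g f m)

def dfs (graph : List (Int × List (Option Int))) (num : Option Int) : Bool :=
  dfsFuelA graph (graph.length + 1) num

-- ===== PORT B =====
-- one round of `for n in list(reach): if n is not None and n in graph: for m in graph[n]: reach.add(m)`
def stepReach (g : List (Int × List (Option Int))) (reach : PySem.Set (Option Int)) :
    PySem.Set (Option Int) :=
  reach.foldl (fun acc n =>
    match n with
    | none => acc
    | some k =>
      match edgesK g k with
      | none => acc
      | some lst => lst.foldl (fun a m => PySem.Set.add a m) acc) reach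

-- the round loop: up to len(graph)+1 rounds, breaking when the set stops growing
def loopB (g : List (Int × List (Option Int))) :
    Nat → PySem.Set (Option Int) → PySem.Set (Option Int)
  | 0, r => r
  | f+1, r =>
    let r' := stepReach g r
    if PySem.Set.len r' == PySem.Set.len r then r' else loopB g f r'

def dfs_alt (graph : List (Int × List (Option Int))) (num : Option Int) : Bool :=
  PySem.Set.contains (loopB graph (graph.length + 1) (PySem.Set.ofList [num])) none

-- ===== PRECONDITION & SPEC =====
-- successors of a node (None has none; a non-key has none)
def edgesO (g : List (Int × List (Option Int))) : Option Int → List (Option Int)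
  | none => []
  | some k => (edgesK g k).getD []

-- rIn g i a b = "b is reachable from a in at most i edge steps"
def rIn (g : List (Int × List (Option Int))) : Nat → Option Int → Option Int → Bool
  | 0, a, b => a == b
  | i+1, a, b => (a == b) || (edgesO g a).any (fun m => rIn g i m b)

-- Pre_dfs excludes inputs with a cycle reachable from num: on them A's unbounded
-- recursion overflows the stack (RecursionError) except on a few where A happens to
-- find None before entering the cycle and returns True (B agrees there as well).
def Pre_dfs (graph : List (Int × List (Option Int))) (num : Option Int) : Prop :=
  ∀ p ∈ graph, rIn graph (graph.length + 1) num (some p.1) = true →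
    (edgesO graph (some p.1)).any
      (fun m => rIn graph (graph.length + 1) m (some p.1)) = false

instance (graph : List (Int × List (Option Int))) (num : Option Int) :
    Decidable (Pre_dfs graph num) := by unfold Pre_dfs; infer_instance

def pvWitness_dfs : (List (Int × List (Option Int))) × Option Int :=
  ([(1, [some 2]), (2, [none])], some 1)

def Spec_dfs (graph : List (Int × List (Option Int))) (num : Option Int) (out : Bool) : Prop := out = dfs_alt graph num
instance (graph : List (Int × List (Option Int))) (num : Option Int) (out : Bool) : Decidable (Spec_dfs graph num out) := by unfold Spec_dfs; infer_instance

-- ===== CLAIM (what is proved, stated in full; the proofs are below) =====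
def Claim_equal_dfs : Prop := ∀ (graph : List (Int × List (Option Int))) (num : Option Int), Dom_dfs graph num → Pre_dfs graph num → Spec_dfs graph num (dfs graph num)

-- ===== LEMMAS AND PROOFS =====

theorem rIn_refl (g : List (Int × List (Option Int))) (i : Nat) (a : Option Int) :
    rIn g i a a = true := by
  cases i <;> simp [rIn]

theorem rIn_zero_iff (g : List (Int × List (Option Int))) (a b : Option Int) :
    rIn g 0 a b = true ↔ a = b := by
  simp [rIn]

theorem rIn_succ_iff (g : List (Int × List (Option Int))) (i : Nat) (a b : Option Int) :
    rIn g (i+1) a b = true ↔ a = b ∨ ∃ m ∈ edgesO g a, rIn g i m b = true := by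
  simp [rIn, List.any_eq_true]

-- extending a reachability derivation at the BACK by one edge
theorem rIn_succ_back (g : List (Int × List (Option Int))) (i : Nat) (a b : Option Int) :
    rIn g (i+1) a b = true ↔
      rIn g i a b = true ∨ ∃ y, rIn g i a y = true ∧ b ∈ edgesO g y := by
  induction i generalizing a with
  | zero =>
    simp only [rIn_succ_iff, rIn_zero_iff]
    constructor
    · rintro (rfl | ⟨m, hm, rfl⟩)
      · exact Or.inl rfl
      · exact Or.inr ⟨a, rfl, hm⟩
    · rintro (rfl | ⟨y, rfl, hb⟩)
      · exact Or.inl rfl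
      · exact Or.inr ⟨b, hb, rfl⟩
  | succ i ih =>
    constructor
    · intro h
      rcases (rIn_succ_iff g (i+1) a b).mp h with rfl | ⟨m, hm, hmb⟩
      · exact Or.inl (rIn_refl g (i+1) a)
      · rcases (ih m).mp hmb with h' | ⟨y, hy, hby⟩
        · exact Or.inl ((rIn_succ_iff g i a b).mpr (Or.inr ⟨m, hm, h'⟩))
        · exact Or.inr ⟨y, (rIn_succ_iff g i a y).mpr (Or.inr ⟨m, hm, hy⟩), hby⟩
    · rintro (h | ⟨y, hy, hby⟩)
      · -- monotonicity case
        rcases (rIn_succ_iff g i a b).mp h with rfl | ⟨m, hm, hmb⟩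
        · exact rIn_refl g _ _
        · exact (rIn_succ_iff g (i+1) a b).mpr
            (Or.inr ⟨m, hm, (ih m).mpr (Or.inl hmb)⟩)
      · rcases (rIn_succ_iff g i a y).mp hy with rfl | ⟨m, hm, hmy⟩
        · exact (rIn_succ_iff g (i+1) a b).mpr
            (Or.inr ⟨b, hby, rIn_refl g (i+1) b⟩)
        · exact (rIn_succ_iff g (i+1) a b).mpr
            (Or.inr ⟨m, hm, (ih m).mpr (Or.inr ⟨y, hmy, hby⟩)⟩)

-- PORT A computes rIn with target None
theorem dfsFuelA_eq_rIn (g : List (Int × List (Option Int))) :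
    ∀ (f : Nat) (num : Option Int), dfsFuelA g f num = rIn g f num none := by
  intro f
  induction f with
  | zero => intro num; cases num <;> simp [dfsFuelA, rIn]
  | succ f ih =>
    intro num
    cases num with
    | none => simp [dfsFuelA, rIn]
    | some n =>
      simp only [dfsFuelA, rIn, edgesO]
      cases h : edgesK g n with
      | none => simp
      | some lst =>
        simp only [Option.getD_some, Bool.false_or, show ((some n == (none : Option Int)) = false) from rfl]
        exact congrArg lst.any (funext fun m => ih m)

-- membership in one inner add-fold
theorem mem_foldl_add_id (l : List (Option Int)) (acc : PySem.Set (Option Int))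
    (x : Option Int) :
    x ∈ l.foldl (fun a m => PySem.Set.add a m) acc ↔ x ∈ acc ∨ x ∈ l := by
  induction l generalizing acc with
  | nil => simp
  | cons h t ih =>
    simp only [List.foldl_cons, ih, PySem.Set.mem_add, List.mem_cons]
    tauto

-- membership in one per-node step of B's loop body
theorem mem_stepBody (g : List (Int × List (Option Int))) (acc : PySem.Set (Option Int))
    (n x : Option Int) :
    (x ∈ (match n with
      | none => acc
      | some k =>
        match edgesK g k with
        | none => acc
        | some lst => lst.foldl (fun a m => PySem.Set.add a m) acc)) ↔
    x ∈ acc ∨ x ∈ edgesO g n := by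
  cases n with
  | none => simp [edgesO]
  | some k =>
    cases hk : edgesK g k with
    | none => simp [edgesO, hk]
    | some lst => simp [edgesO, hk, mem_foldl_add_id]

-- membership after one round of B's loop, generalized over the folded list
theorem mem_foldl_step (g : List (Int × List (Option Int))) (l : List (Option Int))
    (acc : PySem.Set (Option Int)) (x : Option Int) :
    x ∈ l.foldl (fun acc n =>
      match n with
      | none => acc
      | some k =>
        match edgesK g k with
        | none => acc
        | some lst => lst.foldl (fun a m => PySem.Set.add a m) acc) acc ↔
    x ∈ acc ∨ ∃ n ∈ l, x ∈ edgesO g n := by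
  induction l generalizing acc with
  | nil => simp
  | cons h t ih =>
    rw [List.foldl_cons, ih, mem_stepBody]
    constructor
    · rintro ((hx | hx) | ⟨n, hn, hx⟩)
      · exact Or.inl hx
      · exact Or.inr ⟨h, List.mem_cons_self, hx⟩
      · exact Or.inr ⟨n, List.mem_cons_of_mem h hn, hx⟩
    · rintro (hx | ⟨n, hn, hx⟩)
      · exact Or.inl (Or.inl hx)
      · rcases List.mem_cons.mp hn with rfl | hn
        · exact Or.inl (Or.inr hx)
        · exact Or.inr ⟨n, hn, hx⟩

theorem mem_stepReach (g : List (Int × List (Option Int)))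
    (r : PySem.Set (Option Int)) (x : Option Int) :
    x ∈ stepReach g r ↔ x ∈ r ∨ ∃ n ∈ r, x ∈ edgesO g n := by
  unfold stepReach
  exact mem_foldl_step g r r x

-- the reach set after i rounds is exactly rIn-reachability within i steps
theorem mem_iterate_step (g : List (Int × List (Option Int))) (num : Option Int) :
    ∀ (i : Nat) (x : Option Int),
      x ∈ (List.range i).foldl (fun r _ => stepReach g r) (PySem.Set.ofList [num]) ↔
        rIn g i num x = true := by
  intro i
  induction i with
  | zero =>
    intro x
    simp only [List.range_zero, List.foldl_nil, PySem.Set.mem_ofList,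
      List.mem_singleton, rIn, beq_iff_eq]
    exact eq_comm
  | succ i ih =>
    intro x
    rw [List.range_succ, List.foldl_append]
    simp only [List.foldl_cons, List.foldl_nil]
    rw [mem_stepReach, rIn_succ_back]
    constructor
    · rintro (h | ⟨n, hn, hx⟩)
      · exact Or.inl ((ih x).mp h)
      · exact Or.inr ⟨n, (ih n).mp hn, hx⟩
    · rintro (h | ⟨y, hy, hx⟩)
      · exact Or.inl ((ih x).mpr h)
      · exact Or.inr ⟨y, (ih y).mpr hy, hx⟩

-- one round applied in FRONT of the iteration
theorem rangefold_front (g : List (Int × List (Option Int))) (f : Nat)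
    (r : PySem.Set (Option Int)) :
    (List.range (f+1)).foldl (fun r _ => stepReach g r) r
      = (List.range f).foldl (fun r _ => stepReach g r) (stepReach g r) := by
  induction f generalizing r with
  | zero => simp [List.range_succ]
  | succ f ih =>
    rw [List.range_succ, List.foldl_append, ih r, List.range_succ (n := f),
      List.foldl_append]
    simp

theorem nodup_foldl_add (l : List (Option Int)) (acc : PySem.Set (Option Int))
    (h : acc.Nodup) : (l.foldl (fun a m => PySem.Set.add a m) acc).Nodup := by
  induction l generalizing acc with
  | nil => exact h
  | cons y t ih => exact ih _ (PySem.Set.nodup_add _ _ h)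

theorem nodup_stepBody (g : List (Int × List (Option Int))) (acc : PySem.Set (Option Int))
    (n : Option Int) (h : acc.Nodup) :
    ((match n with
      | none => acc
      | some k =>
        match edgesK g k with
        | none => acc
        | some lst => lst.foldl (fun a m => PySem.Set.add a m) acc) :
      PySem.Set (Option Int)).Nodup := by
  cases n with
  | none => exact h
  | some k =>
    cases hk : edgesK g k with
    | none => simp only [hk]; exact h
    | some lst => simp only [hk]; exact nodup_foldl_add lst acc h

theorem nodup_foldl_stepBody (g : List (Int × List (Option Int)))
    (l : List (Option Int)) (acc : PySem.Set (Option Int)) (h : acc.Nodup) :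
    (l.foldl (fun acc n =>
      match n with
      | none => acc
      | some k =>
        match edgesK g k with
        | none => acc
        | some lst => lst.foldl (fun a m => PySem.Set.add a m) acc) acc).Nodup := by
  induction l generalizing acc with
  | nil => exact h
  | cons y t ih => exact ih _ (nodup_stepBody g acc y h)

theorem nodup_stepReach (g : List (Int × List (Option Int)))
    (r : PySem.Set (Option Int)) (h : r.Nodup) : (stepReach g r).Nodup :=
  nodup_foldl_stepBody g r r h

-- stepReach's membership depends only on membership of the input set
theorem memEq_stepReach (g : List (Int × List (Option Int)))
    (s t : PySem.Set (Option Int)) (h : ∀ y, y ∈ s ↔ y ∈ t) (x : Option Int) :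
    x ∈ stepReach g s ↔ x ∈ stepReach g t := by
  rw [mem_stepReach, mem_stepReach]
  constructor
  · rintro (hx | ⟨n, hn, hx⟩)
    · exact Or.inl ((h x).mp hx)
    · exact Or.inr ⟨n, (h n).mp hn, hx⟩
  · rintro (hx | ⟨n, hn, hx⟩)
    · exact Or.inl ((h x).mpr hx)
    · exact Or.inr ⟨n, (h n).mpr hn, hx⟩

theorem memEq_rangefold (g : List (Int × List (Option Int))) (f : Nat) :
    ∀ (s t : PySem.Set (Option Int)), (∀ y, y ∈ s ↔ y ∈ t) → ∀ x,
      (x ∈ (List.range f).foldl (fun r _ => stepReach g r) s ↔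
       x ∈ (List.range f).foldl (fun r _ => stepReach g r) t) := by
  induction f with
  | zero => intro s t h x; simpa using h x
  | succ f ih =>
    intro s t h x
    rw [rangefold_front, rangefold_front]
    exact ih _ _ (memEq_stepReach g s t h) x

-- a member-wise fixpoint stays fixed through the iteration
theorem fix_rangefold (g : List (Int × List (Option Int)))
    (r : PySem.Set (Option Int)) (hfix : ∀ y, y ∈ stepReach g r ↔ y ∈ r) (f : Nat)
    (x : Option Int) :
    x ∈ (List.range f).foldl (fun r _ => stepReach g r) r ↔ x ∈ r := by
  induction f with
  | zero => simp
  | succ f ih =>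
    rw [rangefold_front]
    exact (memEq_rangefold g f _ _ hfix x).trans ih

-- equal size + inclusion + no duplicates ⇒ same members
theorem len_eq_memEq (g : List (Int × List (Option Int)))
    (r : PySem.Set (Option Int)) (hnd : r.Nodup)
    (hlen : (stepReach g r).length = r.length) :
    ∀ y, y ∈ stepReach g r ↔ y ∈ r := by
  intro y
  constructor
  · intro hy
    by_contra hy'
    have hsub : (y :: r) ⊆ stepReach g r := by
      intro z hz
      rcases List.mem_cons.mp hz with rfl | hz
      · exact hy
      · exact (mem_stepReach g r z).mpr (Or.inl hz)
    have hnd' : (y :: r).Nodup := List.nodup_cons.mpr ⟨hy', hnd⟩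
    have hcard : (y :: r).toFinset.card ≤ (stepReach g r).toFinset.card :=
      Finset.card_le_card (fun z hz =>
        List.mem_toFinset.mpr (hsub (List.mem_toFinset.mp hz)))
    rw [List.toFinset_card_of_nodup hnd'] at hcard
    have hle := List.toFinset_card_le (stepReach g r)
    rw [hlen] at hle
    simp only [List.length_cons] at hcard
    omega
  · intro hy
    exact (mem_stepReach g r y).mpr (Or.inl hy)

-- the early-exit loop computes the same members as the full iteration
theorem mem_loopB (g : List (Int × List (Option Int))) :
    ∀ (f : Nat) (r : PySem.Set (Option Int)), r.Nodup → ∀ (x : Option Int),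
      (x ∈ loopB g f r ↔
       x ∈ (List.range f).foldl (fun r _ => stepReach g r) r) := by
  intro f
  induction f with
  | zero => intro r _ x; simp [loopB]
  | succ f ih =>
    intro r hnd x
    rw [rangefold_front]
    show x ∈ (if PySem.Set.len (stepReach g r) == PySem.Set.len r
        then stepReach g r else loopB g f (stepReach g r)) ↔ _
    split_ifs with h
    · have hlen : (stepReach g r).length = r.length := by
        simpa [PySem.Set.len] using h
      have hmemEq := len_eq_memEq g r hnd hlen
      have hfix : ∀ y, y ∈ stepReach g (stepReach g r) ↔ y ∈ stepReach g r := by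
        intro y
        exact memEq_stepReach g (stepReach g r) r hmemEq y
      exact (fix_rangefold g (stepReach g r) hfix f x).symm
    · exact ih (stepReach g r) (nodup_stepReach g r hnd) x

-- ===== VERDICT (by name: the statement is the Claim_ definition above) =====
theorem dfs_spec : Claim_equal_dfs := by
  intro graph num _ _
  unfold Spec_dfs dfs dfs_alt
  rw [dfsFuelA_eq_rIn]
  have hmem : ∀ x, x ∈ loopB graph (graph.length + 1) (PySem.Set.ofList [num]) ↔
      rIn graph (graph.length + 1) num x = true := by
    intro x
    exact (mem_loopB graph (graph.length + 1) (PySem.Set.ofList [num])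
      (PySem.Set.nodup_ofList [num]) x).trans
      (mem_iterate_step graph num (graph.length + 1) x)
  cases h : rIn graph (graph.length + 1) num none with
  | true =>
    have := (hmem none).mpr h
    exact ((PySem.Set.contains_iff _ _).mpr this).symm
  | false =>
    rcases hc : PySem.Set.contains
        (loopB graph (graph.length + 1) (PySem.Set.ofList [num])) none with _ | _
    · rfl
    · have := (hmem none).mp ((PySem.Set.contains_iff _ _).mp hc)
      rw [this] at h; cases h
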